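-- pv_equiv track=rewrite | github.com/409085596/TallerHC | Clases/Programas/Tarea07/Ejercicio01.py | determinaIgualdad
-- ===== SOURCE A (Python) =====
-- def determinaIgualdad(l1, l2):
--     if len(l1) == len(l2):
--         if l1 == [] and l2 == []:
--             return "Si son iguales."
--         else:
--             if l1.pop() == l2.pop():
--                 return determinaIgualdad(l1, l2)
--             else:
--                 return "No son iguales."
--     else:
--         return "No son iguales."
-- ===== SOURCE B (Python) =====
-- def determinaIgualdad(l1, l2):
--     if len(l1) != len(l2):
--         return "No son iguales."
--     while l1 or l2:
--         if l1.pop() != l2.pop():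
--             return "No son iguales."
--     return "Si son iguales."
-- ===== Notes on version B (the rewrite author's own statement) =====
-- stated objective: simpler
-- what changed: Replaces the recursive pop-and-recurse structure with a single length check followed by an iterative while loop popping last elements; same return strings and same argument mutation.
import Mathlib
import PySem

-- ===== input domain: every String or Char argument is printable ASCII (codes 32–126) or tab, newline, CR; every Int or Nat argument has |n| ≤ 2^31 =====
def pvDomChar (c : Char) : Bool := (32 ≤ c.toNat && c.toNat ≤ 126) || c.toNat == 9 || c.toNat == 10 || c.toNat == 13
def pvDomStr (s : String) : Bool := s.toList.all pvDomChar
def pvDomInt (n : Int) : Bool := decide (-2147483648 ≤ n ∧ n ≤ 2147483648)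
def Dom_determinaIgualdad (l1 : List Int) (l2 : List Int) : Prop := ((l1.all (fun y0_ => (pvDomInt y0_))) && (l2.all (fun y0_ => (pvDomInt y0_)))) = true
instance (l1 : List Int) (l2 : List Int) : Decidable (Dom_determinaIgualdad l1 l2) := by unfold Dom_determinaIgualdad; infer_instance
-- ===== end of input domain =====

-- B replaces A's pop-and-recurse recursion by a length check plus an iterative last-element loop
-- (same strings, same argument mutation); the equivalence proved here is about the return value.


-- ===== PORT A =====
-- A pops the last element of each list and recurses; pop() is getLast!/dropLast (both lists
-- are nonempty at that point, so pop() cannot raise).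
def determinaIgualdad (l1 : List Int) (l2 : List Int) : String :=
  if l1.length = l2.length then
    if l1 = [] ∧ l2 = [] then "Si son iguales."
    else
      if l1.getLast! = l2.getLast! then determinaIgualdad l1.dropLast l2.dropLast
      else "No son iguales."
  else "No son iguales."
termination_by l1.length
decreasing_by
  rename_i hlen hne heq
  have h1 : l1 ≠ [] := by
    intro h; exact hne ⟨h, by cases l2 with
      | nil => rfl
      | cons a t => simp [h] at hlen⟩
  have := List.length_pos_iff.mpr h1
  simp [List.length_dropLast]; omega

-- ===== PORT B =====
-- B's while loop, popping the last element of each list, is recursion over the reversed lists.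
def altLoop : List Int → List Int → String
  | x :: xs, y :: ys => if x = y then altLoop xs ys else "No son iguales."
  | _, _ => "Si son iguales."

def determinaIgualdad_alt (l1 : List Int) (l2 : List Int) : String :=
  if l1.length ≠ l2.length then "No son iguales."
  else altLoop l1.reverse l2.reverse

-- ===== PRECONDITION & SPEC =====
def Spec_determinaIgualdad (l1 : List Int) (l2 : List Int) (out : String) : Prop := out = determinaIgualdad_alt l1 l2
instance (l1 : List Int) (l2 : List Int) (out : String) : Decidable (Spec_determinaIgualdad l1 l2 out) := by unfold Spec_determinaIgualdad; infer_instance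

-- ===== CLAIM (what is proved, stated in full; the proofs are below) =====
def Claim_equal_determinaIgualdad : Prop := ∀ (l1 : List Int) (l2 : List Int), Dom_determinaIgualdad l1 l2 → Spec_determinaIgualdad l1 l2 (determinaIgualdad l1 l2)

-- ===== LEMMAS AND PROOFS =====
theorem determinaIgualdad_rev (r1 : List Int) : ∀ (r2 : List Int), r1.length = r2.length →
    determinaIgualdad r1.reverse r2.reverse = altLoop r1 r2 := by
  induction r1 with
  | nil =>
    intro r2 h
    have : r2 = [] := List.length_eq_zero_iff.mp h.symm
    subst this
    simp [determinaIgualdad, altLoop]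
  | cons x xs ih =>
    intro r2 h
    cases r2 with
    | nil => simp at h
    | cons y ys =>
      have hlen : xs.length = ys.length := by simpa using h
      rw [determinaIgualdad]
      have hne : ¬((x :: xs).reverse = [] ∧ (y :: ys).reverse = []) := by simp
      rw [if_pos (by simp [hlen]), if_neg hne]
      have g1 : (x :: xs).reverse.getLast! = x := by
        simp [List.reverse_cons]
      have g2 : (y :: ys).reverse.getLast! = y := by
        simp [List.reverse_cons]
      have d1 : (x :: xs).reverse.dropLast = xs.reverse := by
        simp [List.reverse_cons]
      have d2 : (y :: ys).reverse.dropLast = ys.reverse := by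
        simp [List.reverse_cons]
      rw [g1, g2, d1, d2, altLoop]
      by_cases hxy : x = y
      · rw [if_pos hxy, if_pos hxy, ih ys hlen]
      · rw [if_neg hxy, if_neg hxy]

-- ===== VERDICT (by name: the statement is the Claim_ definition above) =====
theorem determinaIgualdad_spec : Claim_equal_determinaIgualdad := by
  intro l1 l2 _
  unfold Spec_determinaIgualdad determinaIgualdad_alt
  by_cases h : l1.length = l2.length
  · rw [if_neg (by omega)]
    have := determinaIgualdad_rev l1.reverse l2.reverse (by simpa using h)
    simpa using this
  · rw [if_pos (by omega), determinaIgualdad, if_neg h]
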